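-- pv_equiv track=rewrite | github.com/rsaha77/everybody_codes | 2025/17.py | parse
-- ===== SOURCE A (Python) =====
-- def parse(lines):
--   G, Rv, Cv = [], -1, -1
--   for r, line in enumerate(lines):
--     G.append(line)
--     for c, ch in enumerate(line):
--       if ch == '@':
--         Rv, Cv = r, c
--   assert ([Rv, Cv] != [-1, -1])
--   return G, Rv, Cv
-- ===== SOURCE B (Python) =====
-- def parse(lines):
--     G = list(lines)
--     Rv, Cv = -1, -1
--     for rev_r, line in enumerate(reversed(G)):
--         for rev_c, ch in enumerate(reversed(line)):
--             if ch == '@':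
--                 Rv, Cv = len(G) - 1 - rev_r, len(line) - 1 - rev_c
--                 break
--         if Rv != -1:
--             break
--     assert [Rv, Cv] != [-1, -1]
--     return G, Rv, Cv
-- ===== Notes on version B (the rewrite author's own statement) =====
-- stated objective: alternative
-- what changed: Instead of a full forward nested scan that overwrites the marker position at every '@', B scans rows and characters in reverse and stops at the first '@' found, which is the last one in reading order.
import Mathlib
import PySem

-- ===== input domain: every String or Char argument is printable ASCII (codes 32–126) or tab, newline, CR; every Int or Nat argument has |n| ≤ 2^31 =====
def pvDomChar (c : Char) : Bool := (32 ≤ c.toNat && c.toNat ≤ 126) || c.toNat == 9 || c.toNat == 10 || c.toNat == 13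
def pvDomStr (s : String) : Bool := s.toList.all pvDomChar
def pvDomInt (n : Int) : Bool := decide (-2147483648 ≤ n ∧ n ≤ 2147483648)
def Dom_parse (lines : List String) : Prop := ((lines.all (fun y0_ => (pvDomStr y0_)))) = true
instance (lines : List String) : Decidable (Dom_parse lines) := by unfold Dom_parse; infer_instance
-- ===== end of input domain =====

-- B differs from A only in traversal order: A scans everything forward and overwrites; B scans in reverse and stops early.

-- ===== PORT A =====
-- A: forward nested scan, G.append per row, (Rv,Cv) overwritten at every '@'; the bare assert passes on Pre_.
def parse (lines : List String) : List String × Int × Int :=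
  (PySem.List.enumerate lines).foldl
    (fun (st : List String × Int × Int) p =>
      (st.1 ++ [p.2],
        (PySem.List.enumerate p.2.toList).foldl
          (fun (st2 : Int × Int) q => if q.2 = '@' then (p.1, q.1) else st2) st.2))
    ([], -1, -1)

-- ===== PORT B =====
-- inner loop of B: reversed(line) with running reverse index j, n = len(line); break = return
def parseAltCol (n : Int) (j : Int) : List Char → Option Int
  | [] => none
  | ch :: rest => if ch = '@' then some (n - 1 - j) else parseAltCol n (j + 1) rest

-- outer loop of B: reversed(G) with running reverse index i, m = len(G); break = return
def parseAltRow (m : Int) (i : Int) : List String → Int × Int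
  | [] => (-1, -1)
  | line :: rest =>
    match parseAltCol (line.toList.length : Int) 0 line.toList.reverse with
    | some c => (m - 1 - i, c)
    | none => parseAltRow m (i + 1) rest

def parse_alt (lines : List String) : List String × Int × Int :=
  (lines, parseAltRow (lines.length : Int) 0 lines.reverse)

-- ===== PRECONDITION & SPEC =====
-- Pre_ excludes exactly the inputs with no '@' anywhere, on which A's bare assert raises AssertionError (B keeps the same assert).
def Pre_parse (lines : List String) : Prop := ∃ line ∈ lines, '@' ∈ line.toList
instance (lines : List String) : Decidable (Pre_parse lines) := by unfold Pre_parse; infer_instance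
def pvWitness_parse : List String := ["a@"]

def Spec_parse (lines : List String) (out : List String × Int × Int) : Prop := out = parse_alt lines
instance (lines : List String) (out : List String × Int × Int) : Decidable (Spec_parse lines out) := by unfold Spec_parse; infer_instance

-- ===== CLAIM (what is proved, stated in full; the proofs are below) =====
def Claim_equal_parse : Prop := ∀ (lines : List String), Dom_parse lines → Pre_parse lines → Spec_parse lines (parse lines)

-- ===== LEMMAS AND PROOFS =====

-- Option-valued view of B's search, used only in the proofs
def revFindO (m : Int) (i : Int) : List String → Option (Int × Int)
  | [] => none
  | line :: rest =>
    match parseAltCol (line.toList.length : Int) 0 line.toList.reverse with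
    | some c => some (m - 1 - i, c)
    | none => revFindO m (i + 1) rest

theorem parseAltRow_eq_revFindO (ls : List String) : ∀ m i,
    parseAltRow m i ls = (revFindO m i ls).getD (-1, -1) := by
  induction ls with
  | nil => intro m i; rfl
  | cons line rest ih =>
    intro m i
    simp only [parseAltRow, revFindO]
    cases parseAltCol (line.toList.length : Int) 0 line.toList.reverse with
    | none => exact ih m (i + 1)
    | some c => rfl

theorem parseAltCol_shift (cs : List Char) : ∀ n j,
    parseAltCol (n + 1) (j + 1) cs = parseAltCol n j cs := by
  induction cs with
  | nil => intro n j; rfl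
  | cons ch rest ih =>
    intro n j
    simp only [parseAltCol]
    split
    · congr 1; ring
    · exact ih n (j + 1)

theorem revFindO_shift (ls : List String) : ∀ m i,
    revFindO (m + 1) (i + 1) ls = revFindO m i ls := by
  induction ls with
  | nil => intro m i; rfl
  | cons line rest ih =>
    intro m i
    simp only [revFindO]
    cases parseAltCol (line.toList.length : Int) 0 line.toList.reverse with
    | none => simp only []; exact ih m (i + 1)
    | some c =>
      simp only []
      congr 2
      ring

-- A's inner loop over one line equals B's reverse scan of that line
theorem innerA_eq (cs : List Char) : ∀ (r : Int) (st : Int × Int),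
    (PySem.List.enumerate cs).foldl
        (fun (st2 : Int × Int) q => if q.2 = '@' then (r, q.1) else st2) st =
      match parseAltCol (cs.length : Int) 0 cs.reverse with
      | some c => (r, c)
      | none => st := by
  induction cs using List.reverseRecOn with
  | nil => intro r st; rfl
  | append_singleton cs ch ih =>
    intro r st
    rw [PySem.List.enumerate_append, List.foldl_append, ih]
    simp only [List.reverse_append, List.reverse_singleton, List.singleton_append,
      PySem.List.enumerate, List.foldl_cons, List.foldl_nil, List.length_append, List.length_singleton,
      parseAltCol]
    by_cases h : ch = '@'
    · simp [h]
    · simp only [h, if_false]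
      rw [show ((cs.length + 1 : Nat) : Int) = (cs.length : Int) + 1 by push_cast; ring,
        parseAltCol_shift]

-- A's outer loop accumulates exactly the input lines in G
theorem fstA_eq (ls : List String) : ∀ (s0 : Int) (a : List String) (s : Int × Int),
    ((PySem.List.enumerate ls s0).foldl
        (fun (st : List String × Int × Int) p =>
          (st.1 ++ [p.2],
            (PySem.List.enumerate p.2.toList).foldl
              (fun (st2 : Int × Int) q => if q.2 = '@' then (p.1, q.1) else st2) st.2))
        (a, s)).1 = a ++ ls := by
  induction ls with
  | nil => intro s0 a s; simp [PySem.List.enumerate_nil]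
  | cons x xs ih =>
    intro s0 a s
    rw [PySem.List.enumerate_cons, List.foldl_cons]
    simpa using ih (s0 + 1) (a ++ [x]) _

-- A's outer loop (the (Rv,Cv) component) equals B's reverse row search
theorem outerA_eq (ls : List String) : ∀ (st : Int × Int),
    ((PySem.List.enumerate ls).foldl
        (fun (st : List String × Int × Int) p =>
          (st.1 ++ [p.2],
            (PySem.List.enumerate p.2.toList).foldl
              (fun (st2 : Int × Int) q => if q.2 = '@' then (p.1, q.1) else st2) st.2))
        ([], st)).2 =
      (revFindO (ls.length : Int) 0 ls.reverse).getD st := by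
  induction ls using List.reverseRecOn with
  | nil => intro st; rfl
  | append_singleton ls line ih =>
    intro st
    rw [PySem.List.enumerate_append, List.foldl_append]
    simp only [PySem.List.enumerate, List.foldl_cons, List.foldl_nil]
    rw [innerA_eq, ih st]
    have hrev : (ls ++ [line]).reverse = line :: ls.reverse := by simp
    have hlen : (((ls ++ [line]).length : Nat) : Int) = (ls.length : Int) + 1 := by
      push_cast [List.length_append]; simp
    rw [hrev, hlen]
    simp only [revFindO]
    cases parseAltCol ((line.toList.length : Nat) : Int) 0 line.toList.reverse with
    | some c =>
      simp only [Option.getD_some]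
      congr 1
      omega
    | none => rw [revFindO_shift]

theorem parse_eq (lines : List String) : parse lines = parse_alt lines := by
  unfold parse parse_alt
  refine Prod.ext ?_ ?_
  · simpa using fstA_eq lines 0 [] (-1, -1)
  · rw [outerA_eq, parseAltRow_eq_revFindO]

-- ===== VERDICT (by name: the statement is the Claim_ definition above) =====
theorem parse_spec : Claim_equal_parse := by
  intro lines _ _
  exact parse_eq lines
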